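-- pv_equiv track=rewrite | github.com/AsiganTheSunk/python-torrent-scraper | python_magnet_builder/data_struct/magnet_instance.py | pack_announce_list
-- ===== SOURCE A (Python) =====
-- def pack_announce_list(announce_list):
--     udp_announce_list = []
--     http_announce_list = []
--     https_announce_list = []
--     for item in announce_list:
--         if 'udp://' in item:
--             udp_announce_list.append(item)
--         elif 'http://' in item:
--             http_announce_list.append(item)
--         elif 'https://' in item:
--             https_announce_list.append(item)
--     return [https_announce_list, http_announce_list, udp_announce_list]
-- ===== SOURCE B (Python) =====
-- def pack_announce_list(announce_list):
--     udp = [x for x in announce_list if 'udp://' in x]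
--     http = [x for x in announce_list if 'http://' in x and 'udp://' not in x]
--     https = [x for x in announce_list
--              if 'https://' in x and 'http://' not in x and 'udp://' not in x]
--     return [https, http, udp]
-- ===== Notes on version B (the rewrite author's own statement) =====
-- stated objective: alternative
-- what changed: Replaces the single elif-chained categorizing loop with three independent filtering passes (one per scheme, with negative guards preserving the elif priority), assembled in the return order.
import Mathlib
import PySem

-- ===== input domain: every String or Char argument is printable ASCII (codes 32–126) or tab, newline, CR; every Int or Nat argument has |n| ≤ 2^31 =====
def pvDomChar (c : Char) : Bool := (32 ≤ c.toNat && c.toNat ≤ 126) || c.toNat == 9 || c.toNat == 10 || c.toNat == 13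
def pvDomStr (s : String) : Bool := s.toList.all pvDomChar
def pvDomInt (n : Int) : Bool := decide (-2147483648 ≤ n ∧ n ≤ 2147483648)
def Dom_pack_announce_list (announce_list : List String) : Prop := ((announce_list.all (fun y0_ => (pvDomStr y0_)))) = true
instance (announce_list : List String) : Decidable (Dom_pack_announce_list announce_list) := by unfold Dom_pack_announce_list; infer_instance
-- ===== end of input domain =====

-- B replaces A's single elif-chained loop by three independent filter passes (alternative decomposition, same cost class).

-- ===== PORT A =====
-- A: one pass, elif chain, three accumulators appended to; return [https, http, udp].
def pack_announce_list (announce_list : List String) : List (List String) :=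
  let acc := announce_list.foldl
    (fun (st : List String × List String × List String) item =>
      let (udp, http, https) := st
      if PySem.Str.isIn "udp://" item then (udp ++ [item], http, https)
      else if PySem.Str.isIn "http://" item then (udp, http ++ [item], https)
      else if PySem.Str.isIn "https://" item then (udp, http, https ++ [item])
      else (udp, http, https))
    ([], [], [])
  [acc.2.2, acc.2.1, acc.1]

-- ===== PORT B =====
-- B: three filter passes, negative guards keeping the elif priority.
def pack_announce_list_alt (announce_list : List String) : List (List String) :=
  let udp := announce_list.filter (fun x => PySem.Str.isIn "udp://" x)
  let http := announce_list.filter (fun x =>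
    PySem.Str.isIn "http://" x && !PySem.Str.isIn "udp://" x)
  let https := announce_list.filter (fun x =>
    PySem.Str.isIn "https://" x && !PySem.Str.isIn "http://" x && !PySem.Str.isIn "udp://" x)
  [https, http, udp]

-- ===== PRECONDITION & SPEC =====
def Spec_pack_announce_list (announce_list : List String) (out : List (List String)) : Prop := out = pack_announce_list_alt announce_list
instance (announce_list : List String) (out : List (List String)) : Decidable (Spec_pack_announce_list announce_list out) := by unfold Spec_pack_announce_list; infer_instance

-- ===== CLAIM (what is proved, stated in full; the proofs are below) =====
def Claim_equal_pack_announce_list : Prop := ∀ (announce_list : List String), Dom_pack_announce_list announce_list → Spec_pack_announce_list announce_list (pack_announce_list announce_list)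

-- ===== LEMMAS AND PROOFS =====

theorem pack_foldl_inv (l : List String) (u h s : List String) :
    l.foldl
      (fun (st : List String × List String × List String) item =>
        if PySem.Str.isIn "udp://" item then (st.1 ++ [item], st.2)
        else if PySem.Str.isIn "http://" item then (st.1, st.2.1 ++ [item], st.2.2)
        else if PySem.Str.isIn "https://" item then (st.1, st.2.1, st.2.2 ++ [item])
        else st)
      (u, h, s)
    = (u ++ l.filter (fun x => PySem.Str.isIn "udp://" x),
       h ++ l.filter (fun x => PySem.Str.isIn "http://" x && !PySem.Str.isIn "udp://" x),
       s ++ l.filter (fun x => PySem.Str.isIn "https://" x && !PySem.Str.isIn "http://" x && !PySem.Str.isIn "udp://" x)) := by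
  induction l generalizing u h s with
  | nil => simp
  | cons a t ih =>
    simp only [List.foldl_cons, List.filter_cons]
    by_cases hu : PySem.Str.isIn "udp://" a = true <;>
      by_cases hh : PySem.Str.isIn "http://" a = true <;>
        by_cases hs : PySem.Str.isIn "https://" a = true <;>
          simp_all


-- ===== VERDICT (by name: the statement is the Claim_ definition above) =====
theorem pack_announce_list_spec : Claim_equal_pack_announce_list := by
  intro l _
  show _ = _
  simp only [pack_announce_list, pack_announce_list_alt]
  rw [show (fun (st : List String × List String × List String) item =>
        if PySem.Str.isIn "udp://" item then (st.1 ++ [item], st.2.1, st.2.2)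
        else if PySem.Str.isIn "http://" item then (st.1, st.2.1 ++ [item], st.2.2)
        else if PySem.Str.isIn "https://" item then (st.1, st.2.1, st.2.2 ++ [item])
        else (st.1, st.2.1, st.2.2)) = (fun (st : List String × List String × List String) item =>
        if PySem.Str.isIn "udp://" item then (st.1 ++ [item], st.2)
        else if PySem.Str.isIn "http://" item then (st.1, st.2.1 ++ [item], st.2.2)
        else if PySem.Str.isIn "https://" item then (st.1, st.2.1, st.2.2 ++ [item])
        else st) from by funext st item; rcases st with ⟨u, h, s⟩; rfl,
     pack_foldl_inv]
  simp
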